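-- pv_equiv track=rewrite | github.com/html5lib/html5lib-python | html5lib/treewalkers/__init__.py | concatenateCharacterTokens
-- ===== SOURCE A (Python) =====
-- def concatenateCharacterTokens(tokens):
--     pendingCharacters = []
--     for token in tokens:
--         type = token["type"]
--         if type in ("Characters", "SpaceCharacters"):
--             pendingCharacters.append(token["data"])
--         else:
--             if pendingCharacters:
--                 yield {"type": "Characters", "data": "".join(pendingCharacters)}
--                 pendingCharacters = []
--             yield token
--     if pendingCharacters:
--         yield {"type": "Characters", "data": "".join(pendingCharacters)}
-- ===== SOURCE B (Python) =====
-- def concatenateCharacterTokens(tokens):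
--     def is_char(t):
--         return t["type"] in ("Characters", "SpaceCharacters")
--
--     toks = list(tokens)
--     n = len(toks)
--     i = 0
--     while i < n:
--         if is_char(toks[i]):
--             j = i
--             while j < n and is_char(toks[j]):
--                 j += 1
--             yield {"type": "Characters",
--                    "data": "".join(t["data"] for t in toks[i:j])}
--             i = j
--         else:
--             yield toks[i]
--             i += 1
-- ===== Notes on version B (the rewrite author's own statement) =====
-- stated objective: alternative
-- what changed: Replaces the pending-buffer state machine (accumulate, flush on boundary and at the end) with run-grouping: each maximal run of character tokens is located with an inner scan and emitted as one merged token directly.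
import Mathlib
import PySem

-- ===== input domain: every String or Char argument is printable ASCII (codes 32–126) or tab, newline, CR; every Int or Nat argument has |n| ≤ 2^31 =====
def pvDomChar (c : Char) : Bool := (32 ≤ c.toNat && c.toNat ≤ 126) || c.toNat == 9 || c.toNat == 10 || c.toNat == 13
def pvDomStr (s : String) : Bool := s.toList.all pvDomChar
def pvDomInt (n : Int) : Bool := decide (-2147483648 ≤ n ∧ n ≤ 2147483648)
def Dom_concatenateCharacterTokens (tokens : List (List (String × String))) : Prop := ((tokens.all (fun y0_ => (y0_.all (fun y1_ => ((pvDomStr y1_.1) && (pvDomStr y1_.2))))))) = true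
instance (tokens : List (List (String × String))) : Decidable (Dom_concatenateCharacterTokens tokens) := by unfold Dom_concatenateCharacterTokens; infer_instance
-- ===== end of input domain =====

-- B replaces A's pending-buffer state machine with direct grouping of maximal character-token
-- runs (objective: alternative decomposition, same cost). Both are generators in Python; the
-- equivalence is about the produced token sequence.

-- shared token helpers (both Pythons read token["type"] / token["data"] the same way)
def pvIsCharTok (t : List (String × String)) : Bool :=
  let ty := (PySem.Dict.mk t).getD "type" ""
  ty == "Characters" || ty == "SpaceCharacters"

def pvDataTok (t : List (String × String)) : String :=
  (PySem.Dict.mk t).getD "data" ""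

def pvCharsTok (l : List String) : List (String × String) :=
  [("type", "Characters"), ("data", PySem.Str.join "" l)]

-- ===== PORT A =====
-- the for-loop with its pendingCharacters accumulator; flush on a non-char token and at the end
def pvGoA : List String → List (List (String × String)) → List (List (String × String))
  | pending, [] => if pending.isEmpty then [] else [pvCharsTok pending]
  | pending, t :: rest =>
    if pvIsCharTok t then
      pvGoA (pending ++ [pvDataTok t]) rest
    else
      (if pending.isEmpty then [] else [pvCharsTok pending]) ++ t :: pvGoA [] rest

def concatenateCharacterTokens (tokens : List (List (String × String))) : List (List (String × String)) :=
  pvGoA [] tokens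

-- ===== PORT B =====
-- run-grouping: a char token heads a maximal char run (inner scan = takeWhile/dropWhile),
-- emitted as one merged token; other tokens pass through
def concatenateCharacterTokens_alt (tokens : List (List (String × String))) : List (List (String × String)) :=
  match tokens with
  | [] => []
  | t :: rest =>
    if pvIsCharTok t then
      pvCharsTok (((t :: rest).takeWhile pvIsCharTok).map pvDataTok)
        :: concatenateCharacterTokens_alt (rest.dropWhile pvIsCharTok)
    else
      t :: concatenateCharacterTokens_alt rest
termination_by tokens.length
decreasing_by
  · exact Nat.lt_succ_of_le (List.length_dropWhile_le _ _)
  · exact Nat.lt_succ_self _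

-- ===== PRECONDITION & SPEC =====
-- Pre_ excludes exactly the tokens on which Python A raises KeyError: a token without a
-- "type" key, or a character/space token without a "data" key.
def Pre_concatenateCharacterTokens (tokens : List (List (String × String))) : Prop :=
  ∀ t ∈ tokens, (PySem.Dict.mk t).contains "type" = true ∧
    (pvIsCharTok t = true → (PySem.Dict.mk t).contains "data" = true)
instance (tokens : List (List (String × String))) : Decidable (Pre_concatenateCharacterTokens tokens) := by
  unfold Pre_concatenateCharacterTokens; infer_instance

def pvWitness_concatenateCharacterTokens : (List (List (String × String))) :=
  [[("type", "Characters"), ("data", "ab")], [("type", "StartTag"), ("name", "p")],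
   [("type", "SpaceCharacters"), ("data", " ")], [("type", "Characters"), ("data", "c")]]

def Spec_concatenateCharacterTokens (tokens : List (List (String × String))) (out : List (List (String × String))) : Prop := out = concatenateCharacterTokens_alt tokens
instance (tokens : List (List (String × String))) (out : List (List (String × String))) : Decidable (Spec_concatenateCharacterTokens tokens out) := by unfold Spec_concatenateCharacterTokens; infer_instance

-- ===== CLAIM (what is proved, stated in full; the proofs are below) =====
def Claim_equal_concatenateCharacterTokens : Prop := ∀ (tokens : List (List (String × String))), Dom_concatenateCharacterTokens tokens → Pre_concatenateCharacterTokens tokens → Spec_concatenateCharacterTokens tokens (concatenateCharacterTokens tokens)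

-- ===== LEMMAS AND PROOFS =====

-- A's accumulator run, related to B's run-grouping: with pending text buffered, the buffer is
-- merged with the leading char run of the remaining tokens.
theorem pvGoA_eq (tokens : List (List (String × String))) : ∀ pending : List String,
    pvGoA pending tokens =
      if pending.isEmpty then concatenateCharacterTokens_alt tokens
      else pvCharsTok (pending ++ (tokens.takeWhile pvIsCharTok).map pvDataTok)
            :: concatenateCharacterTokens_alt (tokens.dropWhile pvIsCharTok) := by
  induction tokens with
  | nil =>
    intro pending
    cases pending with
    | nil => simp [pvGoA, concatenateCharacterTokens_alt]
    | cons p ps => simp [pvGoA, concatenateCharacterTokens_alt]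
  | cons t rest ih =>
    intro pending
    by_cases hc : pvIsCharTok t = true
    · rw [show pvGoA pending (t :: rest) = pvGoA (pending ++ [pvDataTok t]) rest by
        simp [pvGoA, hc]]
      rw [ih (pending ++ [pvDataTok t])]
      have hne : (pending ++ [pvDataTok t]).isEmpty = false := by
        cases pending <;> simp
      rw [hne]
      simp only [Bool.false_eq_true, if_false]
      rw [List.takeWhile_cons_of_pos hc, List.dropWhile_cons_of_pos hc]
      cases pending with
      | nil =>
        simp only [List.isEmpty_nil, if_true]
        rw [concatenateCharacterTokens_alt]
        simp [hc, List.takeWhile_cons_of_pos hc]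
      | cons p ps =>
        simp
    · have hcf : pvIsCharTok t = false := by simpa using hc
      rw [show pvGoA pending (t :: rest) =
          (if pending.isEmpty then [] else [pvCharsTok pending]) ++ t :: pvGoA [] rest by
        simp [pvGoA, hcf]]
      rw [ih []]
      simp only [List.isEmpty_nil, if_true]
      rw [List.takeWhile_cons_of_neg (by simp [hcf]), List.dropWhile_cons_of_neg (by simp [hcf])]
      cases pending with
      | nil =>
        simp only [List.isEmpty_nil, if_true, List.nil_append]
        rw [concatenateCharacterTokens_alt]
        simp [hcf]
      | cons p ps =>
        simp only [List.isEmpty_cons, Bool.false_eq_true, if_false, List.map_nil,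
          List.append_nil, List.singleton_append]
        rw [concatenateCharacterTokens_alt]
        simp [hcf]

-- ===== VERDICT (by name: the statement is the Claim_ definition above) =====
theorem concatenateCharacterTokens_spec : Claim_equal_concatenateCharacterTokens := by
  intro tokens _ _
  unfold Spec_concatenateCharacterTokens concatenateCharacterTokens
  rw [pvGoA_eq tokens []]
  simp
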